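-- pv_equiv track=rewrite | github.com/taso-ventures/game_arena | game_arena/harness/prompts/freeciv_prompts.py | _determine_position
-- ===== SOURCE A (Python) =====
-- from typing import (Any, Dict, Final, List, Literal, Optional, Set, Tuple,
--                     TypedDict, TypeVar)
--
-- def _determine_position(score: int, players: Dict[int, Any]) -> str:
--     """Determine player's relative position based on score.
--
--     Args:
--         score: Current player's score
--         players: Dictionary of all players
--
--     Returns:
--         Position description string
--     """
--     if not players:
--         return "Unknown position"
--
--     all_scores = [p.get('score', 0) for p in players.values()]
--     sorted_scores = sorted(all_scores, reverse=True)
--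
--     if not sorted_scores or score >= sorted_scores[0]:
--         return "Leading"
--     elif score >= sorted_scores[len(sorted_scores)//2]:
--         return "Middle pack"
--     else:
--         return "Behind"
-- ===== SOURCE B (Python) =====
-- def _determine_position(score, players):
--     """Label relative position in one pass: count players and strictly greater scores."""
--     n = 0
--     greater = 0
--     for p in players.values():
--         n += 1
--         if p.get('score', 0) > score:
--             greater += 1
--     if n == 0:
--         return "Unknown position"
--     if greater == 0:
--         return "Leading"
--     return "Middle pack" if greater <= n // 2 else "Behind"
-- ===== Notes on version B (the rewrite author's own statement) =====
-- stated objective: simpler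
-- what changed: Replaces the descending sort plus two positional lookups by a single fold over the players that counts them and counts scores strictly greater than the player's, using that score >= sorted_desc[i] iff that count is <= i.
import Mathlib
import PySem

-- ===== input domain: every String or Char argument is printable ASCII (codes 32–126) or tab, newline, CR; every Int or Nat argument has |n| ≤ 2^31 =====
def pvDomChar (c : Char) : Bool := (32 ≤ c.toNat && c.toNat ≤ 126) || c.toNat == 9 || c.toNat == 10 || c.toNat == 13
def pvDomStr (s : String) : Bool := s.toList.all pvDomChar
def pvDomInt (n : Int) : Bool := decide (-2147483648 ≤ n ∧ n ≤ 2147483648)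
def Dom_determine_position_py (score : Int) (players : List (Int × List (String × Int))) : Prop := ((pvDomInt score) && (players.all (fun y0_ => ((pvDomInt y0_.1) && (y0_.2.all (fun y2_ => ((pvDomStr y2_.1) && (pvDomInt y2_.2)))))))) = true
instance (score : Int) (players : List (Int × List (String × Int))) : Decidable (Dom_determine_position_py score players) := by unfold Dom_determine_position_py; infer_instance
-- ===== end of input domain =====

-- B replaces A's descending sort and positional lookups by one single-pass fold counting players and strictly greater scores (simpler, no sort, no intermediate score list).

-- ===== PORT A =====
def determine_position_py (score : Int) (players : List (Int × List (String × Int))) : String :=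
  if players = [] then "Unknown position"
  else
    let all_scores := players.map (fun kv => PySem.Dict.getD (PySem.Dict.ofList kv.2) "score" 0)
    let sorted_scores := PySem.List.sorted all_scores (fun x => x) true
    if sorted_scores = [] ∨ score ≥ PySem.List.pyGetD sorted_scores 0 0 then "Leading"
    else if score ≥ PySem.List.pyGetD sorted_scores ((sorted_scores.length / 2 : Nat) : Int) 0 then "Middle pack"
    else "Behind"

-- ===== PORT B =====
def determine_position_py_alt (score : Int) (players : List (Int × List (String × Int))) : String :=
  let st := players.foldl
    (fun (acc : Nat × Nat) kv =>
      (acc.1 + 1,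
       if PySem.Dict.getD (PySem.Dict.ofList kv.2) "score" 0 > score then acc.2 + 1 else acc.2))
    (0, 0)
  if st.1 = 0 then "Unknown position"
  else if st.2 = 0 then "Leading"
  else if st.2 ≤ st.1 / 2 then "Middle pack"
  else "Behind"

-- ===== PRECONDITION & SPEC =====
def Spec_determine_position_py (score : Int) (players : List (Int × List (String × Int))) (out : String) : Prop := out = determine_position_py_alt score players
instance (score : Int) (players : List (Int × List (String × Int))) (out : String) : Decidable (Spec_determine_position_py score players out) := by unfold Spec_determine_position_py; infer_instance

-- ===== CLAIM (what is proved, stated in full; the proofs are below) =====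
def Claim_equal_determine_position_py : Prop := ∀ (score : Int) (players : List (Int × List (String × Int))), Dom_determine_position_py score players → Spec_determine_position_py score players (determine_position_py score players)

-- ===== LEMMAS AND PROOFS =====

-- B's fold computes the length and the count of strictly greater scores.
lemma fold_count (score : Int) :
    ∀ (l : List (Int × List (String × Int))) (acc : Nat × Nat),
      l.foldl
        (fun (acc : Nat × Nat) kv =>
          (acc.1 + 1,
           if PySem.Dict.getD (PySem.Dict.ofList kv.2) "score" 0 > score then acc.2 + 1 else acc.2))
        acc
      = (acc.1 + l.length,
         acc.2 + (l.map (fun kv => PySem.Dict.getD (PySem.Dict.ofList kv.2) "score" 0)).countP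
           (fun s => decide (score < s))) := by
  intro l
  induction l with
  | nil => intro acc; simp
  | cons a t ih =>
    intro acc
    rw [List.foldl_cons, ih]
    simp only [List.map_cons, List.countP_cons, List.length_cons]
    by_cases h : score < PySem.Dict.getD (PySem.Dict.ofList a.2) "score" 0
    · simp [gt_iff_lt, h, Prod.ext_iff]
      omega
    · simp [gt_iff_lt, h, Prod.ext_iff]
      omega

-- In a descending list, "score ≥ the element at index i" ⇔ "at most i elements are strictly greater than score".
lemma count_le_iff_getD (score : Int) :
    ∀ (d : List Int), d.Pairwise (fun a b => b ≤ a) → ∀ (i : Nat), i < d.length →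
      (d.countP (fun s => decide (score < s)) ≤ i ↔ d.getD i 0 ≤ score) := by
  intro d
  induction d with
  | nil => intro _ i hi; simp at hi
  | cons a t ih =>
    intro hp i hi
    rw [List.pairwise_cons] at hp
    obtain ⟨ha, hpt⟩ := hp
    have hall : a ≤ score → t.countP (fun s => decide (score < s)) = 0 := by
      intro h
      rw [List.countP_eq_zero]
      intro s hs
      have := ha s hs
      simp; omega
    cases i with
    | zero =>
      rw [List.countP_cons, List.getD_cons_zero]
      by_cases hsa : score < a
      · simp only [hsa, decide_true, if_true]
        constructor
        · intro h; omega
        · intro h; omega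
      · have h0 := hall (by omega)
        simp only [hsa, decide_false, Bool.false_eq_true, if_false, h0]
        constructor
        · intro _; omega
        · intro _; omega
    | succ j =>
      have hj : j < t.length := by simpa using hi
      have iht := ih hpt j hj
      rw [List.countP_cons, List.getD_cons_succ]
      by_cases hsa : score < a
      · simp only [hsa, decide_true, if_true]
        rw [← iht]
        omega
      · have h0 := hall (by omega)
        have h2 : t.getD j 0 ≤ a := by
          rw [List.getD_eq_getElem t 0 hj]
          exact ha _ (List.getElem_mem hj)
        simp only [hsa, decide_false, Bool.false_eq_true, if_false, h0]
        constructor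
        · intro _; omega
        · intro _; omega

theorem determine_position_py_spec : Claim_equal_determine_position_py := by
  intro score players _
  unfold Spec_determine_position_py determine_position_py determine_position_py_alt
  rw [fold_count]
  dsimp only
  simp only [Nat.zero_add]
  generalize hxs : players.map (fun kv => PySem.Dict.getD (PySem.Dict.ofList kv.2) "score" 0) = xs
  have hlenxs : xs.length = players.length := by rw [← hxs]; exact List.length_map ..
  by_cases hp : players = []
  · subst hp
    simp at hxs
    subst hxs
    simp
  · have hn0 : ¬ players.length = 0 := by
      simpa [List.length_eq_zero_iff] using hp
    rw [if_neg hp, if_neg hn0]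
    have hne : xs ≠ [] := by
      intro h
      rw [h] at hlenxs
      exact hn0 hlenxs.symm
    set d := PySem.List.sorted xs (fun x => x) true with hd
    have hperm : d.Perm xs := PySem.List.sorted_perm _ _ _
    have hpw : d.Pairwise (fun a b => b ≤ a) := PySem.List.sorted_pairwise_rev xs (fun x => x)
    have hlen : d.length = xs.length := hperm.length_eq
    have hcnt : d.countP (fun s => decide (score < s)) = xs.countP (fun s => decide (score < s)) :=
      hperm.countP_eq _
    have hdne : d ≠ [] := by
      intro h
      rw [h] at hlen
      exact hne (List.length_eq_zero_iff.mp hlen.symm)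
    obtain ⟨a, t, hdc⟩ := List.exists_cons_of_ne_nil hdne
    have hdlenpos : 0 < d.length := List.length_pos_iff.mpr hdne
    have hget0 : PySem.List.pyGetD d 0 0 = d.getD 0 0 := by
      rw [hdc]
      simp [PySem.List.pyGetD, PySem.List.pyIdx?, PySem.List.pyGet?]
    have hmidlt : d.length / 2 < d.length := Nat.div_lt_self hdlenpos (by omega)
    have hgetmid : PySem.List.pyGetD d ((d.length / 2 : Nat) : Int) 0 = d.getD (d.length / 2) 0 := by
      rw [PySem.List.pyGetD_natCast, List.getD_eq_getElem?_getD, List.getElem?_eq_getElem hmidlt]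
    have key0 := count_le_iff_getD score d hpw 0 hdlenpos
    have keymid := count_le_iff_getD score d hpw (d.length / 2) hmidlt
    rw [hcnt] at key0 keymid
    by_cases hlead : xs.countP (fun s => decide (score < s)) = 0
    · have hle : score ≥ PySem.List.pyGetD d 0 0 := by
        rw [hget0]; exact key0.mp (by omega)
      rw [if_pos (Or.inr hle), if_pos hlead]
    · have h1 : ¬ (d = [] ∨ score ≥ PySem.List.pyGetD d 0 0) := by
        rintro (h | h)
        · exact hdne h
        · rw [hget0] at h
          exact hlead (Nat.le_zero.mp (key0.mpr h))
      rw [if_neg h1, if_neg hlead]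
      have hlen2 : players.length / 2 = xs.length / 2 := by rw [hlenxs]
      by_cases hmid : xs.countP (fun s => decide (score < s)) ≤ players.length / 2
      · have : score ≥ PySem.List.pyGetD d ((d.length / 2 : Nat) : Int) 0 := by
          rw [hgetmid]
          exact keymid.mp (by rw [hlen, ← hlen2]; exact hmid)
        rw [if_pos this, if_pos hmid]
      · have : ¬ score ≥ PySem.List.pyGetD d ((d.length / 2 : Nat) : Int) 0 := by
          rw [hgetmid]
          intro h
          exact hmid (by rw [hlen2, ← hlen]; exact keymid.mpr h)
        rw [if_neg this, if_neg hmid]
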